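-- pv_equiv track=rewrite | github.com/omeyn/advent-of-code | 2021/12/twelve_p1.py | prune_paths
-- ===== SOURCE A (Python) =====
-- def prune_paths(paths):
--     new_paths = []
--     for path in paths:
--         good_path = True
--         counts = {}
--         for cave in path:
--             if cave.islower():
--                 if cave in counts:
--                     counts[cave] += 1
--                 else:
--                     counts[cave] = 1
--         for cave in counts:
--             if counts[cave] > 1:
--                 good_path = False
--         if (good_path):
--             new_paths.append(path)
--
--     return new_paths
-- ===== SOURCE B (Python) =====
-- def prune_paths(paths):
--     result = []
--     for path in paths:
--         lowers = sorted(c for c in path if c.islower())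
--         if all(x != y for x, y in zip(lowers, lowers[1:])):
--             result.append(path)
--     return result
-- ===== Notes on version B (the rewrite author's own statement) =====
-- stated objective: alternative
-- what changed: B sorts each path's lowercase caves and rejects the path iff two equal caves land adjacent in the sorted order (sort-then-adjacent-scan), eliminating A's count dictionary and its separate scan over the counts.
import Mathlib
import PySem

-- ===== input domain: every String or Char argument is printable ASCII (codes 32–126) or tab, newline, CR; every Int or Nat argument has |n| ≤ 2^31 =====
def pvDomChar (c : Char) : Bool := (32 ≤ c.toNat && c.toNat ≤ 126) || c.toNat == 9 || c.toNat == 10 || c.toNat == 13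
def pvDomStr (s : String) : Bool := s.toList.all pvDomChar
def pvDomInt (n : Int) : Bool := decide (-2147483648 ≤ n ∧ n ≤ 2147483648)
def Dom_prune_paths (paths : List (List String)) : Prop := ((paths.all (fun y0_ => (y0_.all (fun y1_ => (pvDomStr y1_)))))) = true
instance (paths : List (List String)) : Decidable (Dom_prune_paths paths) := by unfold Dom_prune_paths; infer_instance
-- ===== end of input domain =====

-- B sorts each path's lowercase caves and rejects the path iff two equal caves become adjacent in the
-- sorted order, replacing A's count dictionary and its second scan over the counts; objective: alternative.

-- ===== PORT A =====
-- Python str.islower(): at least one cased char and no uppercase cased char (exact on the ASCII domain)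
def pyIslower (s : String) : Bool :=
  s.toList.any PySem.Chars.islower && !(s.toList.any PySem.Chars.isupper)

def prune_paths (paths : List (List String)) : List (List String) :=
  paths.foldl (fun new_paths path =>
    let counts : PySem.Dict String Int :=
      path.foldl (fun counts cave =>
        if pyIslower cave then
          if counts.contains cave then counts.insert cave (counts.getD cave 0 + 1)
          else counts.insert cave 1
        else counts) PySem.Dict.empty
    let good_path :=
      counts.keys.foldl (fun good_path cave =>
        if counts.getD cave 0 > 1 then false else good_path) true
    if good_path then new_paths ++ [path] else new_paths) []

-- ===== PORT B =====
-- lowers[1:] is the nonnegative slice from index 1, i.e. drop 1 (exact)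
def prune_paths_alt (paths : List (List String)) : List (List String) :=
  paths.foldl (fun result path =>
    let lowers := PySem.List.sorted (path.filter pyIslower) (fun x => x) false
    if (lowers.zip (lowers.drop 1)).all (fun p => p.1 != p.2) then result ++ [path]
    else result) []

-- ===== PRECONDITION & SPEC =====
def Spec_prune_paths (paths : List (List String)) (out : List (List String)) : Prop := out = prune_paths_alt paths
instance (paths : List (List String)) (out : List (List String)) : Decidable (Spec_prune_paths paths out) := by unfold Spec_prune_paths; infer_instance

-- ===== CLAIM (what is proved, stated in full; the proofs are below) =====
def Claim_equal_prune_paths : Prop := ∀ (paths : List (List String)), Dom_prune_paths paths → Spec_prune_paths paths (prune_paths paths)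

-- ===== LEMMAS AND PROOFS =====

-- A's counting loop over one path, as a function (definitionally A's inner foldl)
def countsOf (path : List String) : PySem.Dict String Int :=
  path.foldl (fun counts cave =>
    if pyIslower cave then
      if counts.contains cave then counts.insert cave (counts.getD cave 0 + 1)
      else counts.insert cave 1
    else counts) PySem.Dict.empty

-- the per-path keep conditions (definitionally the conditions inside the ports)
def condA (path : List String) : Bool :=
  (countsOf path).keys.foldl (fun g cave => if (countsOf path).getD cave 0 > 1 then false else g) true

def condB (path : List String) : Bool :=
  let lowers := PySem.List.sorted (path.filter pyIslower) (fun x => x) false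
  (lowers.zip (lowers.drop 1)).all (fun p => p.1 != p.2)

-- A's good_path loop: starts at b, flips to false iff some key has count > 1
theorem foldl_flag (q : String → Prop) [DecidablePred q] (l : List String) (b : Bool) :
    l.foldl (fun g k => if q k then false else g) b = (b && l.all (fun k => !(decide (q k)))) := by
  induction l generalizing b with
  | nil => simp
  | cons x xs ih =>
    rw [List.foldl_cons, ih]
    by_cases h : q x <;> simp [h]

-- A's counting loop is Counter over the lowercase caves
theorem countsOf_eq_counter (path : List String) :
    countsOf path = PySem.Dict.counter (path.filter pyIslower) := by
  unfold countsOf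
  rw [← List.foldl_filter, ← PySem.Dict.foldl_insert_getD_add_one_eq_counter]
  apply PySem.List.foldl_congr_mem
  intro d x _
  by_cases h : d.contains x = true
  · simp [h]
  · have hf : d.contains x = false := by simpa using h
    have h0 : (d.getD x 0 : Int) = 0 := PySem.Dict.getD_of_not_contains d 0 hf
    simp [hf, h0]

-- A's flag for one path holds iff the lowercase caves have no duplicates
theorem condA_iff_nodup (path : List String) :
    condA path = true ↔ (path.filter pyIslower).Nodup := by
  unfold condA
  rw [countsOf_eq_counter]
  set lowers := path.filter pyIslower with hl
  rw [foldl_flag (fun cave => (PySem.Dict.counter lowers).getD cave 0 > 1)]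
  rw [Bool.true_and, List.all_eq_true, List.nodup_iff_count_le_one, PySem.Dict.keys_counter]
  constructor
  · intro h a
    by_cases ha : a ∈ lowers
    · have := h a ((PySem.Set.mem_ofList _ _).2 ha)
      simp only [PySem.Dict.getD_counter, Bool.not_eq_true', decide_eq_false_iff_not, not_lt] at this
      exact_mod_cast this
    · rw [List.count_eq_zero_of_not_mem ha]; omega
  · intro h a _
    have := h a
    simp only [PySem.Dict.getD_counter, Bool.not_eq_true', decide_eq_false_iff_not, not_lt]
    exact_mod_cast this

-- B's adjacent scan is the chain of ≠ over consecutive elements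
theorem zip_all_ne_iff_chain (s : List String) :
    ((s.zip (s.drop 1)).all (fun p => p.1 != p.2)) = true ↔ List.IsChain (· ≠ ·) s := by
  induction s with
  | nil => simp
  | cons x xs ih =>
    rcases xs with _ | ⟨y, ys⟩
    · simp
    · simp only [List.drop_succ_cons, List.drop_zero, List.zip_cons_cons, List.all_cons,
        Bool.and_eq_true, bne_iff_ne, List.isChain_cons_cons] at ih ⊢
      rw [ih]

theorem chain_of_chains {s : List String} (h1 : List.IsChain (· ≤ ·) s) (h2 : List.IsChain (· ≠ ·) s) :
    List.IsChain (· < ·) s := by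
  induction s with
  | nil => exact List.IsChain.nil
  | cons x xs ih =>
    rcases xs with _ | ⟨y, ys⟩
    · exact List.IsChain.singleton _
    · rw [List.isChain_cons_cons] at h1 h2 ⊢
      exact ⟨lt_of_le_of_ne h1.1 h2.1, ih h1.2 h2.2⟩

-- on a ≤-sorted list, adjacent-distinct decides Nodup
theorem adj_ne_iff_nodup (s : List String) (hs : s.Pairwise (· ≤ ·)) :
    ((s.zip (s.drop 1)).all (fun p => p.1 != p.2)) = true ↔ s.Nodup := by
  rw [zip_all_ne_iff_chain]
  constructor
  · intro h
    have hlt := chain_of_chains hs.isChain h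
    exact (List.isChain_iff_pairwise.1 hlt).imp ne_of_lt
  · intro h
    exact h.isChain

-- per-path: A's keep decision equals B's
theorem cond_eq (path : List String) : condA path = condB path := by
  rw [Bool.eq_iff_iff, condA_iff_nodup]
  unfold condB
  have hperm := PySem.List.sorted_perm (path.filter pyIslower) (fun x => x) false
  have hpw := PySem.List.sorted_pairwise (path.filter pyIslower) (fun x => x)
  rw [adj_ne_iff_nodup _ hpw, hperm.nodup_iff]

-- each port's append-accumulator loop is a filter by its condition
theorem A_eq_filter (paths : List (List String)) : prune_paths paths = paths.filter condA := by
  unfold prune_paths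
  show List.foldl (fun acc x => if condA x then acc ++ [id x] else acc) [] paths = _
  rw [PySem.List.foldl_append_if condA id paths []]
  simp

theorem B_eq_filter (paths : List (List String)) : prune_paths_alt paths = paths.filter condB := by
  unfold prune_paths_alt
  show List.foldl (fun acc x => if condB x then acc ++ [id x] else acc) [] paths = _
  rw [PySem.List.foldl_append_if condB id paths []]
  simp

-- ===== VERDICT (by name: the statement is the Claim_ definition above) =====
theorem prune_paths_spec : Claim_equal_prune_paths := by
  intro paths _
  unfold Spec_prune_paths
  rw [A_eq_filter, B_eq_filter]
  exact List.filter_congr (fun p _ => cond_eq p)
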